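-- pv_equiv track=rewrite | github.com/aaw/cnfc | cnfc/tuples.py | __ladner_fischer_network
-- ===== SOURCE A (Python) =====
-- def __ladner_fischer_network(n):
--     zs, reduced = [0]*n, [list(range(n))]
--     while len(reduced[-1]) > 1:
--         prev, current = reduced[-1], []
--         for x,y in zip(prev[::2], prev[1::2]):
--             yield (x,y)
--             current.append(y)
--         if len(prev) % 2 == 1:
--             current.append(prev[-1])
--         reduced.append(current)
--
--     finished = set(r[0] for r in reduced)
--     for result in reversed(reduced):
--         for i, item in enumerate(result):
--             if item not in finished:
--                 yield (result[i-1], item)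
--                 finished.add(item)
-- ===== SOURCE B (Python) =====
-- # B: build the reduction levels first, then emit both sweeps by pure slicing/zipping --
-- # the 'finished' set of A is replaced by a closed-form rule: within each level, down-sweep
-- # edges are exactly zip(lvl[1:-1][::2], lvl[1:-1][1::2]).
-- def __ladner_fischer_network(n):
--     levels = [list(range(n))]
--     while len(levels[-1]) > 1:
--         prev = levels[-1]
--         nxt = prev[1::2]
--         if len(prev) % 2 == 1:
--             nxt.append(prev[-1])
--         levels.append(nxt)
--     for lvl in levels[:-1]:
--         yield from zip(lvl[::2], lvl[1::2])
--     for lvl in reversed(levels):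
--         body = lvl[1:-1]
--         yield from zip(body[::2], body[1::2])
-- ===== Notes on version B (the rewrite author's own statement) =====
-- stated objective: alternative
-- what changed: B first builds the full table of reduction levels, then emits the up-sweep by zipping even/odd slices of each level and replaces A's 'finished'-set down-sweep scan by the closed-form rule that each level's down edges are exactly zip(lvl[1:-1][::2], lvl[1:-1][1::2]), so no membership set is kept at all.
-- outside the precondition, e.g. on __ladner_fischer_network(0): A raises IndexError, B returns []
import Mathlib
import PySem

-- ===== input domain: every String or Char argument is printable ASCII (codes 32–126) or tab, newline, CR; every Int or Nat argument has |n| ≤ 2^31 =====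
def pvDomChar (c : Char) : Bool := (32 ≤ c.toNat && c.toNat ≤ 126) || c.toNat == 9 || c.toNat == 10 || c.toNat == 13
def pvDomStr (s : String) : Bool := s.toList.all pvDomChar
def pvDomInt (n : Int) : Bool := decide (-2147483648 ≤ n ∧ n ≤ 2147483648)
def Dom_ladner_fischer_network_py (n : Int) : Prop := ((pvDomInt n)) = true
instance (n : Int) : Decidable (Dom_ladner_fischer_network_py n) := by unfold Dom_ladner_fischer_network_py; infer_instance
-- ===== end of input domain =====

-- B builds the level table first and emits both sweeps by pure slicing/zipping (no 'finished' set); alternative decomposition, same cost.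


-- ===== PORT A =====
-- inner loop of the down-sweep: 'for i, item in enumerate(result): if item not in finished: yield (result[i-1], item); finished.add(item)'
def aScan (sfx : List Int) (idx : Int) (result : List Int)
    (finished : PySem.Set Int) (out : List (Int × Int)) : PySem.Set Int × List (Int × Int) :=
  match sfx with
  | [] => (finished, out)
  | item :: rest =>
    if !(PySem.Set.contains finished item) then
      aScan rest (idx + 1) result (PySem.Set.add finished item)
        (out ++ [((PySem.List.pyGet? result (idx - 1)).getD 0, item)])
    else
      aScan rest (idx + 1) result finished out

-- 'for result in reversed(reduced): …'
def aDown (levels : List (List Int)) (finished : PySem.Set Int) (out : List (Int × Int)) :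
    PySem.Set Int × List (Int × Int) :=
  match levels with
  | [] => (finished, out)
  | lv :: rest =>
    let r := aScan lv 0 lv finished out
    aDown rest r.1 r.2

-- the while loop (fuel = length of the current level bounds the number of iterations;
-- each iteration at least halves the level, so the initial length is always enough fuel):
-- returns (levels appended to reduced, yielded up-sweep edges)
def aUp (fuel : Nat) (prev : List Int) (out : List (Int × Int)) :
    List (List Int) × List (Int × Int) :=
  match fuel with
  | 0 => ([], out)
  | f + 1 =>
    if 1 < prev.length then
      let pairs := List.zip ((PySem.List.slice? prev none none 2).getD [])
        ((PySem.List.slice? prev (some 1) none 2).getD [])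
      let current := pairs.map Prod.snd
        ++ (if PySem.Int.mod (prev.length : Int) 2 == 1
              then [(PySem.List.pyGet? prev (-1)).getD 0] else [])
      let r := aUp f current (out ++ pairs)
      (current :: r.1, r.2)
    else ([], out)

def ladner_fischer_network_py (n : Int) : List (Int × Int) :=
  let first := PySem.List.pyRange 0 n 1
  let r := aUp first.length first []
  let reduced := first :: r.1
  let finished := PySem.Set.ofList (reduced.map (fun rr => (PySem.List.pyGet? rr 0).getD 0))
  (aDown reduced.reverse finished r.2).2

-- ===== PORT B =====
-- the reduction loop, building the whole table of levels without emitting anything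
-- (fuel bounds the iterations exactly as in aUp)
def bLevels (fuel : Nat) (prev : List Int) : List (List Int) :=
  match fuel with
  | 0 => [prev]
  | f + 1 =>
    if 1 < prev.length then
      let nxt := ((PySem.List.slice? prev (some 1) none 2).getD [])
        ++ (if PySem.Int.mod (prev.length : Int) 2 == 1
              then [(PySem.List.pyGet? prev (-1)).getD 0] else [])
      prev :: bLevels f nxt
    else [prev]

-- 'body = lvl[1:-1]; yield from zip(body[::2], body[1::2])'
def bDownLevel (lv : List Int) : List (Int × Int) :=
  let body := PySem.List.slice lv (some 1) (some (-1))
  List.zip ((PySem.List.slice? body none none 2).getD [])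
    ((PySem.List.slice? body (some 1) none 2).getD [])

def ladner_fischer_network_py_alt (n : Int) : List (Int × Int) :=
  let levels := bLevels (PySem.List.pyRange 0 n 1).length (PySem.List.pyRange 0 n 1)
  let up := (PySem.List.slice levels none (some (-1))).flatMap
    (fun lv => List.zip ((PySem.List.slice? lv none none 2).getD [])
      ((PySem.List.slice? lv (some 1) none 2).getD []))
  let down := levels.reverse.flatMap bDownLevel
  up ++ down

-- ===== PRECONDITION & SPEC =====
-- Pre_ excludes n ≤ 0, where A raises IndexError (r[0] on the empty initial level).
def Pre_ladner_fischer_network_py (n : Int) : Prop := 1 ≤ n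
instance (n : Int) : Decidable (Pre_ladner_fischer_network_py n) := by
  unfold Pre_ladner_fischer_network_py; infer_instance
def pvWitness_ladner_fischer_network_py : Int := 4

def Spec_ladner_fischer_network_py (n : Int) (out : List (Int × Int)) : Prop :=
  out = ladner_fischer_network_py_alt n
instance (n : Int) (out : List (Int × Int)) : Decidable (Spec_ladner_fischer_network_py n out) := by
  unfold Spec_ladner_fischer_network_py; infer_instance

-- ===== CLAIM (what is proved, stated in full; the proofs are below) =====
def Claim_equal_ladner_fischer_network_py : Prop := ∀ (n : Int), Dom_ladner_fischer_network_py n → Pre_ladner_fischer_network_py n → Spec_ladner_fischer_network_py n (ladner_fischer_network_py n)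

-- ===== LEMMAS AND PROOFS =====

mutual
def pvEvens : List Int → List Int
  | [] => []
  | a :: t => a :: pvOdds t
def pvOdds : List Int → List Int
  | [] => []
  | _ :: t => pvEvens t
end

theorem pvEvens_cc (a b : Int) (t : List Int) : pvEvens (a :: b :: t) = a :: pvEvens t := rfl
theorem pvOdds_cc (a b : Int) (t : List Int) : pvOdds (a :: b :: t) = b :: pvOdds t := rfl

theorem pv_len_evens : ∀ l : List Int, (pvEvens l).length = (l.length + 1) / 2
  | [] => rfl
  | [_] => by simp [pvEvens, pvOdds]
  | a :: b :: t => by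
      rw [pvEvens_cc]
      simp only [List.length_cons, pv_len_evens t]
      omega

theorem pv_len_odds : ∀ l : List Int, (pvOdds l).length = l.length / 2
  | [] => rfl
  | [_] => by simp [pvEvens, pvOdds]
  | a :: b :: t => by
      rw [pvOdds_cc]
      simp only [List.length_cons, pv_len_odds t]
      omega

theorem pv_fm_evens : ∀ xs : List Int,
    (List.range ((xs.length + 1) / 2)).filterMap (fun k => xs[2 * k]?) = pvEvens xs
  | [] => rfl
  | [_] => by simp [pvEvens, pvOdds]
  | a :: b :: t => by
      have h2 : (((a :: b :: t).length + 1) / 2) = ((t.length + 1) / 2) + 1 := by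
        simp only [List.length_cons]; omega
      rw [h2, List.range_succ_eq_map, List.filterMap_cons, List.filterMap_map]
      have he : ∀ k : Nat, (a :: b :: t)[2 * (k + 1)]? = t[2 * k]? := by
        intro k
        have : 2 * (k + 1) = 2 * k + 1 + 1 := by omega
        rw [this]
        simp [List.getElem?_cons_succ]
      simp only [Function.comp_def, Nat.succ_eq_add_one, he]
      simp [pv_fm_evens t, pvEvens_cc]

theorem pv_fm_odds : ∀ xs : List Int,
    (List.range (xs.length / 2)).filterMap (fun k => xs[2 * k + 1]?) = pvOdds xs
  | [] => rfl
  | [_] => by simp [pvEvens, pvOdds]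
  | a :: b :: t => by
      have h2 : ((a :: b :: t).length / 2) = (t.length / 2) + 1 := by
        simp only [List.length_cons]; omega
      rw [h2, List.range_succ_eq_map, List.filterMap_cons, List.filterMap_map]
      have he : ∀ k : Nat, (a :: b :: t)[2 * (k + 1) + 1]? = t[2 * k + 1]? := by
        intro k
        have : 2 * (k + 1) + 1 = 2 * k + 1 + 1 + 1 := by omega
        rw [this]
        simp [List.getElem?_cons_succ]
      simp only [Function.comp_def, Nat.succ_eq_add_one, he]
      simp [pv_fm_odds t, pvOdds_cc]

theorem pv_slice2_evens (xs : List Int) :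
    PySem.List.slice? xs none none 2 = some (pvEvens xs) := by
  rw [← pv_fm_evens]
  simp only [PySem.List.slice?, PySem.List.sliceIndices]
  norm_num
  have hc : (if 0 < xs.length then (((xs.length:Int) + 2 - 1) / 2).toNat else 0) = (xs.length + 1) / 2 := by
    split <;> omega
  rw [hc]
  apply List.filterMap_congr
  intro k _
  have : ((2 * (k:Int)).toNat) = 2 * k := by omega
  rw [this]

theorem pv_slice2_odds (xs : List Int) :
    PySem.List.slice? xs (some 1) none 2 = some (pvOdds xs) := by
  rw [← pv_fm_odds]
  simp only [PySem.List.slice?, PySem.List.sliceIndices]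
  norm_num
  have hm : min 1 ((xs.length:Int)) = if xs.length = 0 then 0 else 1 := by split <;> omega
  rw [hm]
  by_cases hL : xs.length = 0
  · simp [hL]
  · simp only [if_neg hL]
    have hc : (if 1 < xs.length then (((xs.length:Int) - 1 + 2 - 1) / 2).toNat else 0) = xs.length / 2 := by
      split <;> omega
    rw [hc]
    apply List.filterMap_congr
    intro k _
    have : ((1 + 2 * (k:Int)).toNat) = 2 * k + 1 := by omega
    rw [this]

-- the carry written as the ports write it, normalised
theorem pv_carry_eq (l : List Int) :
    (if PySem.Int.mod ((l.length : Int)) 2 == 1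
       then [(PySem.List.pyGet? l (-1)).getD 0] else [])
    = (if l.length % 2 = 1 then [(l.getLast?).getD 0] else []) := by
  have hm : PySem.Int.mod ((l.length : Int)) 2 = ((l.length % 2 : Nat) : Int) := by
    exact_mod_cast PySem.Int.mod_natCast l.length 2
  rw [hm, PySem.List.pyGet?_neg_one]
  rcases Nat.mod_two_eq_zero_or_one l.length with h | h <;> simp [h]

def pvStep (l : List Int) : List Int :=
  pvOdds l ++ (if l.length % 2 = 1 then [(l.getLast?).getD 0] else [])

theorem pv_len_step (l : List Int) : (pvStep l).length = l.length / 2 + l.length % 2 := by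
  unfold pvStep
  rcases Nat.mod_two_eq_zero_or_one l.length with h | h <;>
    simp [h, pv_len_odds]

theorem pv_len_step_lt (l : List Int) (h : 1 < l.length) : (pvStep l).length < l.length := by
  rw [pv_len_step]; omega

def pvLevels (l : List Int) : List (List Int) :=
  if _h : 1 < l.length then l :: pvLevels (pvStep l) else [l]
termination_by l.length
decreasing_by exact pv_len_step_lt l _h

def pvZipEO : List Int → List (Int × Int)
  | a :: b :: t => (a, b) :: pvZipEO t
  | _ => []

def pvZipEO' : List Int → List (Int × Int)
  | a :: b :: t => if t.isEmpty then [] else (a, b) :: pvZipEO' t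
  | _ => []

def pvUpE (l : List Int) : List (Int × Int) :=
  if _h : 1 < l.length then pvZipEO l ++ pvUpE (pvStep l) else []
termination_by l.length
decreasing_by exact pv_len_step_lt l _h

def pvHd (lv : List Int) : Int := (PySem.List.pyGet? lv 0).getD 0

theorem pv_zip_eo : ∀ l : List Int, List.zip (pvEvens l) (pvOdds l) = pvZipEO l
  | [] => rfl
  | [_] => rfl
  | a :: b :: t => by
      rw [pvEvens_cc, pvOdds_cc]
      show (a, b) :: List.zip (pvEvens t) (pvOdds t) = pvZipEO (a :: b :: t)
      rw [pv_zip_eo t]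
      rfl

theorem pv_map_snd : ∀ l : List Int, (pvZipEO l).map Prod.snd = pvOdds l
  | [] => rfl
  | [_] => rfl
  | a :: b :: t => by
      show b :: (pvZipEO t).map Prod.snd = pvOdds (a :: b :: t)
      rw [pv_map_snd t, pvOdds_cc]

theorem pv_zipEO_dropLast : ∀ w : List Int, pvZipEO w.dropLast = pvZipEO' w
  | [] => rfl
  | [_] => rfl
  | [_, _] => rfl
  | a :: b :: c :: t => by
      have h1 : (a :: b :: c :: t).dropLast = a :: b :: (c :: t).dropLast := by simp
      rw [h1]
      show (a, b) :: pvZipEO ((c :: t).dropLast) = pvZipEO' (a :: b :: c :: t)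
      rw [pv_zipEO_dropLast (c :: t)]
      simp [pvZipEO']

theorem pv_evens_sub : ∀ l : List Int, (pvEvens l).Sublist l
  | [] => List.Sublist.refl _
  | [a] => List.Sublist.refl _
  | a :: b :: t => by
      rw [pvEvens_cc]
      exact List.Sublist.cons₂ a ((pv_evens_sub t).cons b)

theorem pv_evens_last_sub : ∀ l : List Int, l.length % 2 = 0 → l ≠ [] →
    (pvEvens l ++ [(l.getLast?).getD 0]).Sublist l
  | [], h, hne => absurd rfl hne
  | [a], h, _ => by simp at h
  | [a, b], _, _ => List.Sublist.refl _
  | a :: b :: c :: t, h, _ => by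
      have hlast : ((a :: b :: c :: t).getLast?).getD 0 = ((c :: t).getLast?).getD 0 := by
        simp [List.getLast?_cons_cons]
      rw [pvEvens_cc, hlast]
      have ht : (c :: t).length % 2 = 0 := by simp at h ⊢; omega
      exact List.Sublist.cons₂ a (((pv_evens_last_sub (c :: t) ht (by simp)).cons b))

theorem pv_step_sub_tail (l : List Int) (h : 2 ≤ l.length) : (pvStep l).Sublist l.tail := by
  match l, h with
  | [], h => simp at h
  | a :: t, h =>
    have ht : t ≠ [] := by intro hh; subst hh; simp at h
    show (pvOdds (a :: t) ++ _).Sublist t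
    have ho : pvOdds (a :: t) = pvEvens t := rfl
    have hlast : ((a :: t).getLast?).getD 0 = (t.getLast?).getD 0 := by
      cases t with
      | nil => exact absurd rfl ht
      | cons c u => simp [List.getLast?_cons_cons]
    rw [ho, hlast]
    rcases Nat.mod_two_eq_zero_or_one t.length with he | hodd
    · have hone : (a :: t).length % 2 = 1 := by simp; omega
      rw [if_pos hone]
      exact pv_evens_last_sub t he ht
    · have hzero : (a :: t).length % 2 = 0 := by simp; omega
      rw [hzero]
      norm_num
      exact pv_evens_sub t

theorem pv_step_sub (l : List Int) (h : 2 ≤ l.length) : (pvStep l).Sublist l :=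
  (pv_step_sub_tail l h).trans (List.tail_sublist l)

theorem pv_step_nodup (l : List Int) (hnd : l.Nodup) : (pvStep l).Nodup := by
  by_cases h : 2 ≤ l.length
  · exact (pv_step_sub l h).nodup hnd
  · rcases l with _ | ⟨a, _ | ⟨b, t⟩⟩
    · simp [pvStep, pvOdds]
    · simp [pvStep, pvOdds, pvEvens]
    · simp at h

theorem pv_hd_eq (l : List Int) (h : l ≠ []) : pvHd l = l.headD 0 := by
  cases l with
  | nil => exact absurd rfl h
  | cons a t => simp [pvHd]

theorem pv_head_not_mem_step (l : List Int) (h : 2 ≤ l.length) (hnd : l.Nodup) :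
    pvHd l ∉ pvStep l := by
  match l, h with
  | a :: t, h =>
    intro hmem
    have ha : pvHd (a :: t) = a := by simp [pvHd]
    rw [ha] at hmem
    have := (pv_step_sub_tail (a :: t) h).subset hmem
    simp at this
    exact (List.nodup_cons.mp hnd).1 this

-- getElem? characterisations of the even/odd sublists
theorem pv_getElem_evens : ∀ (l : List Int) (j : Nat), (pvEvens l)[j]? = l[2 * j]?
  | [], j => by simp [pvEvens]
  | [a], j => by
      match j with
      | 0 => rfl
      | j + 1 =>
        have h1 : pvEvens [a] = [a] := rfl
        rw [h1, List.getElem?_eq_none (by simp), List.getElem?_eq_none (by simp only [List.length_singleton]; omega)]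
  | a :: b :: t, j => by
      match j with
      | 0 => rfl
      | j + 1 =>
        rw [pvEvens_cc]
        show (pvEvens t)[j]? = _
        rw [pv_getElem_evens t j]
        have h2 : 2 * (j + 1) = 2 * j + 1 + 1 := by omega
        rw [h2]
        simp [List.getElem?_cons_succ]

theorem pv_getElem_odds : ∀ (l : List Int) (j : Nat), (pvOdds l)[j]? = l[2 * j + 1]?
  | [], j => by simp [pvOdds]
  | [a], j => by
      have h1 : pvOdds [a] = [] := rfl
      rw [h1, List.getElem?_eq_none (by simp), List.getElem?_eq_none (by simp only [List.length_singleton]; omega)]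
  | a :: b :: t, j => by
      match j with
      | 0 => rfl
      | j + 1 =>
        rw [pvOdds_cc]
        show (pvOdds t)[j]? = _
        rw [pv_getElem_odds t j]
        have h2 : 2 * (j + 1) + 1 = 2 * j + 1 + 1 + 1 := by omega
        rw [h2]
        simp [List.getElem?_cons_succ]

theorem pv_mem_odds_iff (l : List Int) (hnd : l.Nodup) (i : Nat) (hi : i < l.length) :
    l[i] ∈ pvOdds l ↔ i % 2 = 1 := by
  constructor
  · intro hmem
    rcases List.mem_iff_getElem?.mp hmem with ⟨j, hj⟩
    rw [pv_getElem_odds] at hj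
    have hjlt : 2 * j + 1 < l.length := by
      by_contra hh
      rw [List.getElem?_eq_none (by omega)] at hj
      simp at hj
    rw [List.getElem?_eq_getElem hjlt] at hj
    have := (List.Nodup.getElem_inj_iff hnd).mp (Option.some.inj hj)
    omega
  · intro hodd
    obtain ⟨j, hji⟩ : ∃ j, i = 2 * j + 1 := ⟨i / 2, by omega⟩
    apply List.mem_iff_getElem?.mpr
    refine ⟨j, ?_⟩
    rw [pv_getElem_odds, ← hji]
    exact List.getElem?_eq_getElem hi

theorem pv_last_eq_getElem (l : List Int) (h : l ≠ []) :
    (l.getLast?).getD 0 = l[l.length - 1]'(by have := List.length_pos_iff.mpr h; omega) := by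
  rw [List.getLast?_eq_getElem?,
    List.getElem?_eq_getElem (by have := List.length_pos_iff.mpr h; omega)]
  rfl

-- membership in the step level, by index
theorem pv_mem_step_iff (l : List Int) (hnd : l.Nodup) (i : Nat) (hi : i < l.length) :
    l[i] ∈ pvStep l ↔ (i % 2 = 1 ∨ (l.length % 2 = 1 ∧ i = l.length - 1)) := by
  have hne : l ≠ [] := by intro hh; subst hh; simp at hi
  unfold pvStep
  rw [List.mem_append, pv_mem_odds_iff l hnd i hi]
  rcases Nat.mod_two_eq_zero_or_one l.length with he | ho
  · simp [he]; try omega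
  · rw [if_pos ho]
    simp only [List.mem_singleton, ho, true_and]
    have hlast := pv_last_eq_getElem l hne
    constructor
    · rintro (h1 | h2)
      · exact Or.inl h1
      · rw [hlast] at h2
        exact Or.inr ((List.Nodup.getElem_inj_iff hnd).mp h2)
    · rintro (h1 | h2)
      · exact Or.inl h1
      · right
        rw [hlast]
        exact (List.Nodup.getElem_inj_iff hnd).mpr h2

-- chain facts
theorem pvLevels_ne_nil (l : List Int) : pvLevels l ≠ [] := by
  unfold pvLevels
  split <;> simp

theorem pvLevels_eq_cons (l : List Int) (h : 1 < l.length) :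
    pvLevels l = l :: pvLevels (pvStep l) := by
  rw [pvLevels, dif_pos h]

theorem pvLevels_eq_single (l : List Int) (h : ¬ 1 < l.length) :
    pvLevels l = [l] := by
  rw [pvLevels, dif_neg h]

theorem pv_levels_sub (l : List Int) : ∀ lv ∈ pvLevels l, lv.Sublist l := by
  by_cases h : 1 < l.length
  · rw [pvLevels_eq_cons l h]
    intro lv hlv
    rcases List.mem_cons.mp hlv with rfl | hlv
    · exact List.Sublist.refl _
    · exact ((pv_levels_sub (pvStep l)) lv hlv).trans (pv_step_sub l (by omega))
  · rw [pvLevels_eq_single l h]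
    intro lv hlv
    simp at hlv
    subst hlv
    exact List.Sublist.refl _
termination_by l.length
decreasing_by exact pv_len_step_lt l (by omega)

theorem pv_levels_ne (l : List Int) (hne : l ≠ []) : ∀ lv ∈ pvLevels l, lv ≠ [] := by
  by_cases h : 1 < l.length
  · rw [pvLevels_eq_cons l h]
    intro lv hlv
    rcases List.mem_cons.mp hlv with rfl | hlv
    · exact hne
    · refine pv_levels_ne (pvStep l) ?_ lv hlv
      have hs := pv_len_step l
      intro hh
      rw [hh] at hs
      simp at hs
      omega
  · rw [pvLevels_eq_single l h]
    intro lv hlv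
    simp at hlv
    subst hlv
    exact hne
termination_by l.length
decreasing_by exact pv_len_step_lt l (by omega)

theorem pv_heads_sub (l : List Int) (hne : l ≠ []) :
    ∀ x ∈ (pvLevels l).map pvHd, x ∈ l := by
  intro x hx
  rcases List.mem_map.mp hx with ⟨lv, hlv, rfl⟩
  have hlvne := pv_levels_ne l hne lv hlv
  have hsub := pv_levels_sub l lv hlv
  have hin : pvHd lv ∈ lv := by
    rw [pv_hd_eq lv hlvne]
    cases lv with
    | nil => exact absurd rfl hlvne
    | cons a t => simp
  exact hsub.subset hin

-- contains ↔ mem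
theorem pv_contains_iff (s : PySem.Set Int) (x : Int) :
    PySem.Set.contains s x = true ↔ x ∈ s := by
  simp [PySem.Set.contains]

-- the index condition under which an element is already finished when the down-sweep scans it
def pvCond (L j : Nat) : Prop := j = 0 ∨ j % 2 = 1 ∨ (L % 2 = 1 ∧ j = L - 1)

-- the down-sweep scan of one level: emits exactly zip(lvl[1:-1][::2], lvl[1:-1][1::2])
theorem pv_scan_odd (l : List Int) (hnd : l.Nodup) :
    ∀ (rest : List Int) (k : Nat) (F : PySem.Set Int) (out : List (Int × Int)),
    k % 2 = 1 → l.drop k = rest →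
    (∀ (j : Nat) (hj : j < l.length), k ≤ j → (PySem.Set.contains F (l[j]) = true ↔ pvCond l.length j)) →
    (aScan rest (k : Int) l F out).2 = out ++ pvZipEO' rest ∧
    (∀ x : Int, x ∈ (aScan rest (k : Int) l F out).1 ↔ x ∈ F ∨ x ∈ rest)
  | [], k, F, out, hk, hdrop, hF => by
      simp [aScan, pvZipEO']
  | [x], k, F, out, hk, hdrop, hF => by
      have hlen : l.length = k + 1 := by
        have hh := congrArg List.length hdrop
        simp only [List.length_drop, List.length_singleton] at hh
        omega
      have hkl : k < l.length := by omega
      have hx : l[k] = x := by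
        have h0 : (l.drop k)[0]? = some x := by rw [hdrop]; rfl
        rw [List.getElem?_drop, Nat.add_zero, List.getElem?_eq_getElem hkl] at h0
        exact Option.some.inj h0
      have hc : PySem.Set.contains F x = true := by
        have hcc := (hF k hkl (le_refl k)).mpr (Or.inr (Or.inl hk))
        rwa [hx] at hcc
      have hxF : x ∈ F := (pv_contains_iff F x).mp hc
      have hres : aScan [x] (k : Int) l F out = (F, out) := by
        simp [aScan, hxF]
      rw [hres]
      refine ⟨by simp [pvZipEO'], ?_⟩
      intro x'
      simp only [List.mem_singleton]
      constructor
      · intro hh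
        exact Or.inl hh
      · rintro (hh | rfl)
        · exact hh
        · exact hxF
  | x :: y :: t, k, F, out, hk, hdrop, hF => by
      have hlen : l.length = k + 2 + t.length := by
        have hh := congrArg List.length hdrop
        simp only [List.length_drop, List.length_cons] at hh
        omega
      have hkl : k < l.length := by omega
      have hk1 : k + 1 < l.length := by omega
      have hx : l[k] = x := by
        have h0 : (l.drop k)[0]? = some x := by rw [hdrop]; rfl
        rw [List.getElem?_drop, Nat.add_zero, List.getElem?_eq_getElem hkl] at h0
        exact Option.some.inj h0
      have hy : l[k + 1] = y := by
        have h0 : (l.drop k)[1]? = some y := by rw [hdrop]; rfl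
        rw [List.getElem?_drop, List.getElem?_eq_getElem hk1] at h0
        exact Option.some.inj h0
      have hdt : l.drop (k + 2) = t := by
        have hh : (l.drop k).drop 2 = l.drop (k + 2) := List.drop_drop
        rw [hdrop] at hh
        simpa using hh.symm
      have hcx : PySem.Set.contains F x = true := by
        have hcc := (hF k hkl (by omega)).mpr (Or.inr (Or.inl hk))
        rwa [hx] at hcc
      have hxF : x ∈ F := (pv_contains_iff F x).mp hcx
      by_cases ht : t = []
      · subst ht
        have hlen2 : l.length = k + 2 := by simpa using hlen
        have hcy : PySem.Set.contains F y = true := by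
          have hcc := (hF (k + 1) hk1 (by omega)).mpr
            (Or.inr (Or.inr ⟨by omega, by omega⟩))
          rwa [hy] at hcc
        have hyF : y ∈ F := (pv_contains_iff F y).mp hcy
        have hres : aScan [x, y] (k : Int) l F out = (F, out) := by
          simp [aScan, hxF, hyF]
        rw [hres]
        refine ⟨by simp [pvZipEO'], ?_⟩
        intro x'
        simp only [List.mem_cons, List.not_mem_nil, or_false]
        constructor
        · intro hh
          exact Or.inl hh
        · rintro (hh | rfl | rfl)
          · exact hh
          · exact hxF
          · exact hyF
      · have hcy : PySem.Set.contains F y = false := by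
          have hiff := hF (k + 1) hk1 (by omega)
          rw [hy] at hiff
          have hcond : ¬ pvCond l.length (k + 1) := by
            have htl : 0 < t.length := List.length_pos_iff.mpr ht
            rintro (hh | hh | ⟨hh1, hh2⟩) <;> omega
          cases hcc : PySem.Set.contains F y with
          | false => rfl
          | true => exact absurd (hiff.mp hcc) hcond
        have hyNF : y ∉ F := by
          intro hh
          rw [← pv_contains_iff, hcy] at hh
          exact Bool.noConfusion hh
        have hgx : l[k]?.getD 0 = x := by
          rw [List.getElem?_eq_getElem hkl, hx]
          rfl
        have hIH := pv_scan_odd l hnd t (k + 2) (PySem.Set.add F y) (out ++ [(x, y)])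
          (by omega) hdt ?hFnext
        case hFnext =>
          intro j hj hjk
          have hne : l[j] ≠ y := by
            rw [← hy]
            intro hh
            have := (List.Nodup.getElem_inj_iff hnd).mp hh
            omega
          have hmm : l[j] ∈ PySem.Set.add F y ↔ l[j] ∈ F := by
            rw [PySem.Set.mem_add]
            simp [hne]
          rw [pv_contains_iff, hmm, ← pv_contains_iff]
          exact hF j hj (by omega)
        have hcast : ((k : Int) + 1 + 1) = (((k + 2 : Nat) : Int)) := by push_cast; ring
        have hunf : aScan (x :: y :: t) (k : Int) l F out
            = aScan t (((k + 2 : Nat) : Int)) l (PySem.Set.add F y) (out ++ [(x, y)]) := by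
          simp [aScan, hxF, hyNF, hgx, hcast]
        rw [hunf]
        refine ⟨?_, ?_⟩
        · rw [hIH.1]
          have hz : pvZipEO' (x :: y :: t) = (x, y) :: pvZipEO' t := by
            simp [pvZipEO', ht]
          rw [hz]
          simp
        · intro x'
          rw [hIH.2 x']
          rw [PySem.Set.mem_add]
          simp only [List.mem_cons]
          constructor
          · rintro ((hh | rfl) | hh)
            · exact Or.inl hh
            · exact Or.inr (Or.inr (Or.inl rfl))
            · exact Or.inr (Or.inr (Or.inr hh))
          · rintro (hh | rfl | rfl | hh)
            · exact Or.inl (Or.inl hh)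
            · exact Or.inl (Or.inl hxF)
            · exact Or.inl (Or.inr rfl)
            · exact Or.inr hh

theorem pv_hd_getElem (l : List Int) (hne : l ≠ []) :
    pvHd l = l[0]'(List.length_pos_iff.mpr hne) := by
  cases l with
  | nil => exact absurd rfl hne
  | cons a t => simp [pvHd]

theorem pv_scan_full (l : List Int) (hne : l ≠ []) (hnd : l.Nodup)
    (F : PySem.Set Int) (out : List (Int × Int))
    (hF : ∀ (j : Nat) (hj : j < l.length), (PySem.Set.contains F (l[j]) = true ↔ pvCond l.length j)) :
    (aScan l 0 l F out).2 = out ++ pvZipEO' l.tail ∧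
    (∀ x : Int, x ∈ (aScan l 0 l F out).1 ↔ x ∈ F ∨ x ∈ l) := by
  cases l with
  | nil => exact absurd rfl hne
  | cons a rest =>
    have hc : PySem.Set.contains F a = true :=
      (hF 0 (by simp)).mpr (Or.inl rfl)
    have haF : a ∈ F := (pv_contains_iff F a).mp hc
    have hunf : aScan (a :: rest) 0 (a :: rest) F out
        = aScan rest (((1 : Nat) : Int)) (a :: rest) F out := by
      simp [aScan, haF]
    have hodd := pv_scan_odd (a :: rest) hnd rest 1 F out (by norm_num) rfl
      (fun j hj _ => hF j hj)
    rw [hunf]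
    refine ⟨hodd.1, ?_⟩
    intro x
    rw [hodd.2 x]
    simp only [List.mem_cons]
    constructor
    · rintro (hh | hh)
      · exact Or.inl hh
      · exact Or.inr (Or.inr hh)
    · rintro (hh | rfl | hh)
      · exact Or.inl hh
      · exact Or.inl haF
      · exact Or.inr hh

theorem pv_aDown_append (xs ys : List (List Int)) (F : PySem.Set Int) (out : List (Int × Int)) :
    aDown (xs ++ ys) F out = aDown ys (aDown xs F out).1 (aDown xs F out).2 := by
  induction xs generalizing F out with
  | nil => rfl
  | cons lv rest ih => simp [aDown, ih]

theorem pv_down_eq (l : List Int) (hne : l ≠ []) (hnd : l.Nodup)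
    (F : PySem.Set Int) (out : List (Int × Int))
    (hF : ∀ x ∈ l, (PySem.Set.contains F x = true ↔ x ∈ (pvLevels l).map pvHd)) :
    (aDown (pvLevels l).reverse F out).2
      = out ++ (pvLevels l).reverse.flatMap (fun lv => pvZipEO' lv.tail) ∧
    (∀ x : Int, x ∈ (aDown (pvLevels l).reverse F out).1 ↔ x ∈ F ∨ x ∈ l) := by
  by_cases h : 1 < l.length
  · have hs2 : 2 ≤ l.length := by omega
    have hnotmem := pv_head_not_mem_step l hs2 hnd
    have hstepne : pvStep l ≠ [] := by
      have hls := pv_len_step l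
      intro hh
      rw [hh] at hls
      simp at hls
      omega
    have hstepsub := pv_step_sub l hs2
    have hF' : ∀ x ∈ pvStep l,
        (PySem.Set.contains F x = true ↔ x ∈ (pvLevels (pvStep l)).map pvHd) := by
      intro x hx
      rw [hF x (hstepsub.subset hx), pvLevels_eq_cons l h, List.map_cons, List.mem_cons]
      constructor
      · rintro (rfl | hh)
        · exact absurd hx hnotmem
        · exact hh
      · exact Or.inr
    have hIH := pv_down_eq (pvStep l) hstepne (pv_step_nodup l hnd) F out hF'
    have hrev : (pvLevels l).reverse = (pvLevels (pvStep l)).reverse ++ [l] := by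
      rw [pvLevels_eq_cons l h]
      simp
    have happ : aDown (pvLevels l).reverse F out
        = aDown [l] (aDown (pvLevels (pvStep l)).reverse F out).1
            (aDown (pvLevels (pvStep l)).reverse F out).2 := by
      rw [hrev, pv_aDown_append]
    have hAl : ∀ (G : PySem.Set Int) (o : List (Int × Int)),
        aDown [l] G o = aScan l 0 l G o := by
      intro G o
      simp [aDown]
    have hF'' : ∀ (j : Nat) (hj : j < l.length),
        (PySem.Set.contains (aDown (pvLevels (pvStep l)).reverse F out).1 (l[j]) = true
          ↔ pvCond l.length j) := by
      intro j hj
      rw [pv_contains_iff, hIH.2 (l[j])]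
      have h1 := hF (l[j]) (List.getElem_mem hj)
      rw [pv_contains_iff] at h1
      rw [h1, pvLevels_eq_cons l h, List.map_cons, List.mem_cons]
      have hheads := pv_heads_sub (pvStep l) hstepne
      have hhd := pv_hd_getElem l hne
      have hstep_iff := pv_mem_step_iff l hnd j hj
      unfold pvCond
      constructor
      · rintro ((heq | hh) | hh)
        · rw [hhd] at heq
          exact Or.inl ((List.Nodup.getElem_inj_iff hnd).mp heq)
        · exact Or.inr (hstep_iff.mp (hheads _ hh))
        · exact Or.inr (hstep_iff.mp hh)
      · rintro (h0 | hrest)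
        · subst h0
          exact Or.inl (Or.inl hhd.symm)
        · exact Or.inr (hstep_iff.mpr hrest)
    have hscan := pv_scan_full l hne hnd (aDown (pvLevels (pvStep l)).reverse F out).1
      (aDown (pvLevels (pvStep l)).reverse F out).2 hF''
    constructor
    · rw [happ, hAl, hscan.1, hIH.1, hrev, List.flatMap_append]
      simp
    · intro x
      rw [happ, hAl, hscan.2 x, hIH.2 x]
      constructor
      · rintro ((hh | hh) | hh)
        · exact Or.inl hh
        · exact Or.inr (hstepsub.subset hh)
        · exact Or.inr hh
      · rintro (hh | hh)
        · exact Or.inl (Or.inl hh)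
        · exact Or.inr hh
  · have hlev : pvLevels l = [l] := pvLevels_eq_single l h
    have hlen1 : l.length = 1 := by
      have := List.length_pos_iff.mpr hne
      omega
    have hhd := pv_hd_getElem l hne
    have hF'' : ∀ (j : Nat) (hj : j < l.length),
        (PySem.Set.contains F (l[j]) = true ↔ pvCond l.length j) := by
      intro j hj
      have hj0 : j = 0 := by omega
      subst hj0
      unfold pvCond
      constructor
      · intro _
        exact Or.inl rfl
      · intro _
        apply (hF (l[0]'(by omega)) (List.getElem_mem (by omega))).mpr
        rw [hlev]
        simp [hhd]
    have hscan := pv_scan_full l hne hnd F out hF''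
    have hAl : aDown [l] F out = aScan l 0 l F out := by
      simp [aDown]
    rw [hlev]
    have htl : l.tail = [] := by
      cases l with
      | nil => rfl
      | cons a t =>
        simp at hlen1
        simp [hlen1]
    constructor
    · show (aDown [l] F out).2 = _
      rw [hAl, hscan.1, htl]
      simp [pvZipEO', htl]
    · intro x
      show x ∈ (aDown [l] F out).1 ↔ _
      rw [hAl, hscan.2 x]
termination_by l.length
decreasing_by exact pv_len_step_lt l (by omega)

-- up-sweep: A's interleaved loop versus the level table
theorem pv_pairs_eq (l : List Int) :
    List.zip ((PySem.List.slice? l none none 2).getD [])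
        ((PySem.List.slice? l (some 1) none 2).getD []) = pvZipEO l := by
  rw [pv_slice2_evens, pv_slice2_odds]
  simp only [Option.getD_some]
  exact pv_zip_eo l

theorem pvUpE_cons (l : List Int) (h : 1 < l.length) :
    pvUpE l = pvZipEO l ++ pvUpE (pvStep l) := by
  rw [pvUpE]
  exact dif_pos h

theorem pvUpE_nil (l : List Int) (h : ¬ 1 < l.length) : pvUpE l = [] := by
  rw [pvUpE]
  exact dif_neg h

theorem pv_aUp_spec (fuel : Nat) :
    ∀ (l : List Int) (out : List (Int × Int)), l.length ≤ fuel →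
    l :: (aUp fuel l out).1 = pvLevels l ∧ (aUp fuel l out).2 = out ++ pvUpE l := by
  induction fuel with
  | zero =>
    intro l out hle
    have hl : l = [] := List.eq_nil_of_length_eq_zero (by omega)
    subst hl
    refine ⟨?_, ?_⟩
    · rw [pvLevels_eq_single [] (by simp)]
      rfl
    · rw [pvUpE_nil [] (by simp)]
      simp [aUp]
  | succ f ih =>
    intro l out hle
    by_cases h : 1 < l.length
    · have hstep : (pvStep l).length ≤ f := by
        have := pv_len_step l
        omega
      have hrec := ih (pvStep l) (out ++ pvZipEO l) hstep
      have hA : aUp (f + 1) l out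
          = ((pvStep l) :: (aUp f (pvStep l) (out ++ pvZipEO l)).1,
             (aUp f (pvStep l) (out ++ pvZipEO l)).2) := by
        simp only [aUp, if_pos h, pv_pairs_eq, pv_map_snd, pv_carry_eq, pvStep]
      rw [hA]
      refine ⟨?_, ?_⟩
      · rw [pvLevels_eq_cons l h]
        exact congrArg _ hrec.1
      · rw [hrec.2, pvUpE_cons l h]
        simp
    · have hA : aUp (f + 1) l out = ([], out) := by
        show (if 1 < l.length then _ else _) = _
        rw [if_neg h]
      rw [hA]
      refine ⟨?_, ?_⟩
      · rw [pvLevels_eq_single l h]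
      · rw [pvUpE, dif_neg h]
        simp

theorem pv_bLevels_eq (fuel : Nat) :
    ∀ (l : List Int), l.length ≤ fuel → bLevels fuel l = pvLevels l := by
  induction fuel with
  | zero =>
    intro l hle
    have hl : l = [] := List.eq_nil_of_length_eq_zero (by omega)
    subst hl
    rw [pvLevels_eq_single [] (by simp)]
    rfl
  | succ f ih =>
    intro l hle
    by_cases h : 1 < l.length
    · have hstep : (pvStep l).length ≤ f := by
        have := pv_len_step l
        omega
      have hn : ((PySem.List.slice? l (some 1) none 2).getD [])
          ++ (if PySem.Int.mod ((l.length : Int)) 2 == 1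
                then [(PySem.List.pyGet? l (-1)).getD 0] else []) = pvStep l := by
        rw [pv_slice2_odds, pv_carry_eq]
        rfl
      have hB : bLevels (f + 1) l = l :: bLevels f (pvStep l) := by
        simp only [bLevels, if_pos h, hn]
      rw [hB, ih (pvStep l) hstep, pvLevels_eq_cons l h]
    · have hB : bLevels (f + 1) l = [l] := by
        show (if 1 < l.length then _ else _) = _
        rw [if_neg h]
      rw [hB, pvLevels_eq_single l h]

theorem pv_upB_aux (l : List Int) :
    (pvLevels l).dropLast.flatMap pvZipEO = pvUpE l := by
  by_cases h : 1 < l.length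
  · rw [pvLevels_eq_cons l h,
      List.dropLast_cons_of_ne_nil (pvLevels_ne_nil (pvStep l)),
      List.flatMap_cons, pv_upB_aux (pvStep l), pvUpE_cons l h]
  · rw [pvLevels_eq_single l h, pvUpE_nil l h]
    rfl
termination_by l.length
decreasing_by exact pv_len_step_lt l (by omega)

theorem pv_upB_eq (l : List Int) :
    (pvLevels l).dropLast.flatMap
      (fun lv => List.zip ((PySem.List.slice? lv none none 2).getD [])
        ((PySem.List.slice? lv (some 1) none 2).getD [])) = pvUpE l := by
  have hfun : (fun lv : List Int => List.zip ((PySem.List.slice? lv none none 2).getD [])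
      ((PySem.List.slice? lv (some 1) none 2).getD [])) = pvZipEO :=
    funext fun lv => pv_pairs_eq lv
  rw [hfun]
  exact pv_upB_aux l

theorem pv_slice_body (l : List Int) : PySem.List.slice l (some 1) (some (-1)) = l.tail.dropLast := by
  simp only [PySem.List.slice, PySem.List.clampIdx]
  norm_num
  rcases l with _ | ⟨a, t⟩
  · simp
  · simp only [List.length_cons, if_neg (List.cons_ne_nil a t)]
    have h1 : min 1 (t.length + 1) = 1 := by omega
    have h2 : ((t.length:Int) + 1 + -1).toNat = t.length := by omega
    have h3 : ((t.length + 1 : Nat) : Int) + -1 = ((t.length:Int) + 1 + -1) := by push_cast; ring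
    rw [h3, h2, h1]
    rw [List.drop_succ_cons, List.drop_zero, List.tail_cons, List.dropLast_eq_take]

theorem pv_bDownLevel_eq (lv : List Int) : bDownLevel lv = pvZipEO' lv.tail := by
  show List.zip ((PySem.List.slice? (PySem.List.slice lv (some 1) (some (-1))) none none 2).getD [])
    ((PySem.List.slice? (PySem.List.slice lv (some 1) (some (-1))) (some 1) none 2).getD [])
    = pvZipEO' lv.tail
  rw [pv_pairs_eq, pv_slice_body]
  exact pv_zipEO_dropLast lv.tail

-- ===== VERDICT (by name: the statement is the Claim_ definition above) =====
theorem ladner_fischer_network_py_spec : Claim_equal_ladner_fischer_network_py := by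
  intro n _ hpre
  unfold Pre_ladner_fischer_network_py at hpre
  unfold Spec_ladner_fischer_network_py
  simp only [ladner_fischer_network_py, ladner_fischer_network_py_alt]
  set l0 := PySem.List.pyRange 0 n 1 with hl0
  have hlen : l0.length = n.toNat := by
    rw [hl0, PySem.List.length_pyRange_one]
    omega
  have hne : l0 ≠ [] := by
    apply List.length_pos_iff.mp
    omega
  have hnd : l0.Nodup := PySem.List.nodup_pyRange_one 0 n
  have hup := pv_aUp_spec l0.length l0 [] (le_refl _)
  rw [hup.1, hup.2]
  have hfun : (fun rr : List Int => (PySem.List.pyGet? rr 0).getD 0) = pvHd := rfl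
  rw [hfun]
  have hdown := pv_down_eq l0 hne hnd
    (PySem.Set.ofList ((pvLevels l0).map pvHd)) ([] ++ pvUpE l0)
    (fun x _ => by rw [pv_contains_iff, PySem.Set.mem_ofList])
  rw [hdown.1]
  rw [pv_bLevels_eq l0.length l0 (le_refl _)]
  rw [PySem.List.slice_to_neg_one]
  rw [pv_upB_eq]
  have hfun2 : bDownLevel = (fun lv : List Int => pvZipEO' lv.tail) :=
    funext pv_bDownLevel_eq
  rw [hfun2]
  simp
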